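-- pv_equiv track=rewrite | github.com/jbaldivieso/adventofcode | 2016/1.py | change_direction
-- ===== SOURCE A (Python) =====
-- def change_direction(cur_dir, turn):
--     """return new val for cur_dir"""
--     left = {
--         "N": "W",
--         "W": "S",
--         "S": "E",
--         "E": "N"
--         }
--     right = {v: k for k, v in left.items()}
--     map_ = left if turn == "L" else right
--     return map_[cur_dir]
-- ===== SOURCE B (Python) =====
-- def change_direction(cur_dir, turn):
--     """return new val for cur_dir"""
--     idx = {"N": 0, "E": 1, "S": 2, "W": 3}[cur_dir]
--     step = -1 if turn == "L" else 1
--     return "NESW"[(idx + step) % 4]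
-- ===== Notes on version B (the rewrite author's own statement) =====
-- stated objective: idiomatic
-- what changed: Replaces the two lookup tables (left dict and its inversion) with a single direction->index map and modular arithmetic over the clockwise cycle NESW.
import Mathlib
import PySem

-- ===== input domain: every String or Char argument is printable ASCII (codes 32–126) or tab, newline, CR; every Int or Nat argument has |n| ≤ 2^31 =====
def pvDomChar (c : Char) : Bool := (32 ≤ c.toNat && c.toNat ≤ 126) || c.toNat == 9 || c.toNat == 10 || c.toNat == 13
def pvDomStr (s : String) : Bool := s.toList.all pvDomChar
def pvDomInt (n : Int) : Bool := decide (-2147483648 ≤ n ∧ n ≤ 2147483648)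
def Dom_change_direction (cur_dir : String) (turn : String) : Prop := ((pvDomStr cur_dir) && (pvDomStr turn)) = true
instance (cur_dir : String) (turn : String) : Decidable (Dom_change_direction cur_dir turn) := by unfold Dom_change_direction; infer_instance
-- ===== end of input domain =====

-- B replaces A's two lookup tables with one index map plus modular arithmetic on the cycle "NESW" (idiomatic).

-- ===== PORT A =====
def change_direction (cur_dir : String) (turn : String) : String :=
  let left : PySem.Dict String String :=
    PySem.Dict.ofList [("N", "W"), ("W", "S"), ("S", "E"), ("E", "N")]
  let right : PySem.Dict String String :=
    PySem.Dict.ofList (left.items.map (fun kv => (kv.2, kv.1)))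
  let map_ := if turn == "L" then left else right
  -- map_[cur_dir]: KeyError (none) is excluded by Pre_change_direction
  (map_.get? cur_dir).getD ""

-- ===== PORT B =====
def change_direction_alt (cur_dir : String) (turn : String) : String :=
  let idx : Option Int :=
    (PySem.Dict.ofList [("N", (0 : Int)), ("E", 1), ("S", 2), ("W", 3)]).get? cur_dir
  -- KeyError (none) excluded by Pre_change_direction
  match idx with
  | none => ""
  | some i =>
    let step : Int := if turn == "L" then -1 else 1
    ((PySem.Str.pyGet? "NESW" (PySem.Int.mod (i + step) 4)).getD ' ').toString

-- ===== PRECONDITION & SPEC =====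
-- A raises KeyError unless cur_dir is one of the four compass letters; Pre_ admits exactly those.
def Pre_change_direction (cur_dir : String) (turn : String) : Prop :=
  cur_dir = "N" ∨ cur_dir = "E" ∨ cur_dir = "S" ∨ cur_dir = "W"
instance (cur_dir : String) (turn : String) : Decidable (Pre_change_direction cur_dir turn) := by
  unfold Pre_change_direction; infer_instance

def pvWitness_change_direction : String × String := ("N", "L")

def Spec_change_direction (cur_dir : String) (turn : String) (out : String) : Prop :=
  out = change_direction_alt cur_dir turn
instance (cur_dir : String) (turn : String) (out : String) : Decidable (Spec_change_direction cur_dir turn out) := by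
  unfold Spec_change_direction; infer_instance

-- ===== CLAIM (what is proved, stated in full; the proofs are below) =====
def Claim_equal_change_direction : Prop :=
  ∀ (cur_dir : String) (turn : String), Dom_change_direction cur_dir turn →
    Pre_change_direction cur_dir turn →
    Spec_change_direction cur_dir turn (change_direction cur_dir turn)

-- ===== LEMMAS AND PROOFS =====

-- ===== VERDICT (by name: the statement is the Claim_ definition above) =====
theorem change_direction_spec : Claim_equal_change_direction := by
  intro cur_dir turn _ hpre
  unfold Spec_change_direction change_direction change_direction_alt
  by_cases h : turn = "L" <;>
    rcases hpre with h1 | h1 | h1 | h1 <;> subst h1 <;> simp [h] <;> decide
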